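-- pv_equiv track=rewrite | github.com/kremrik/doctr | docstring_to_readme/cli.py | overwrite_at_pos
-- ===== SOURCE A (Python) =====
-- def overwrite_at_pos(section: str, readme: str) -> int:
--     readme_lines = readme.split("\n")
--     pos = None
--
--     for idx, line in enumerate(readme_lines):
--         if section in line:
--             pos = idx
--             break
--
--     if pos is not None:
--         return pos
--     else:
--         msg = "Section '{}' not found".format(section)
--         raise RuntimeError(msg)
-- ===== SOURCE B (Python) =====
-- def overwrite_at_pos(section: str, readme: str) -> int:
--     idx = readme.find(section)
--     if idx == -1:
--         msg = "Section '{}' not found".format(section)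
--         raise RuntimeError(msg)
--     return readme.count("\n", 0, idx)
-- ===== Notes on version B (the rewrite author's own statement) =====
-- stated objective: idiomatic
-- what changed: B drops the split-into-lines list and the enumerate loop entirely: it locates the first occurrence with str.find on the raw string and returns the number of newlines before it via str.count, which is the 0-based line index.
import Mathlib
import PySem

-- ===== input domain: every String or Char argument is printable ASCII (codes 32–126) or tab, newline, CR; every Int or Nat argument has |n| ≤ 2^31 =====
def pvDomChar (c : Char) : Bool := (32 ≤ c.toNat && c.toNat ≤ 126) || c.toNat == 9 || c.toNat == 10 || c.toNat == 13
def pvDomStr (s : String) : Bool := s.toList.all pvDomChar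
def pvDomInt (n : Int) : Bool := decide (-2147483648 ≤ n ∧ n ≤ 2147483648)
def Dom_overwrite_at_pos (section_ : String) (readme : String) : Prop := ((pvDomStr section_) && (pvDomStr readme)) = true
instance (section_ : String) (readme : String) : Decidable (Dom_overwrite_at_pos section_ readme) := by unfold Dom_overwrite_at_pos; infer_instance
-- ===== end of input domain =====

-- B replaces A's split-into-lines + enumerate scan by find on the raw string + a newline
-- count before the match (idiomatic, same cost); equality of the RETURN value is proved on Pre_.

-- ===== PORT A =====
-- the 'for idx, line in enumerate(readme_lines): if section in line: pos = idx; break' loop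
def findPosA (sec : List Char) (idx : Nat) : List (List Char) → Option Nat
  | [] => none
  | line :: rest => if PySem.Chars.isIn sec line then some idx else findPosA sec (idx + 1) rest

def overwrite_at_pos (section_ : String) (readme : String) : Int :=
  let readme_lines := PySem.Chars.splitOn readme.toList ['\n']  -- readme.split("\n")
  match findPosA section_.toList 0 readme_lines with
  | some pos => (pos : Int)
  | none => 0  -- Python raises RuntimeError here; these inputs are excluded by Pre_

-- ===== PORT B =====
def overwrite_at_pos_alt (section_ : String) (readme : String) : Int :=
  let idx := PySem.Chars.find readme.toList section_.toList  -- readme.find(section)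
  if idx == -1 then 0  -- Python raises RuntimeError here; excluded by Pre_
  else
    -- readme.count("\n", 0, idx): count on the prefix readme[0:idx]; exact since idx ≥ 0 here
    ((PySem.Chars.count (readme.toList.take idx.toNat) ['\n'] : Nat) : Int)

-- ===== PRECONDITION & SPEC =====
-- Pre_ excludes exactly the inputs on which A raises RuntimeError: those where no line of
-- readme contains section, i.e. section contains a newline or does not occur in readme at all.
def Pre_overwrite_at_pos (section_ : String) (readme : String) : Prop :=
  '\n' ∉ section_.toList ∧ PySem.Chars.isIn section_.toList readme.toList = true
instance (section_ : String) (readme : String) : Decidable (Pre_overwrite_at_pos section_ readme) := by unfold Pre_overwrite_at_pos; infer_instance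
def pvWitness_overwrite_at_pos : String × String := ("b c", "a\nxb c\ny")

def Spec_overwrite_at_pos (section_ : String) (readme : String) (out : Int) : Prop := out = overwrite_at_pos_alt section_ readme
instance (section_ : String) (readme : String) (out : Int) : Decidable (Spec_overwrite_at_pos section_ readme out) := by unfold Spec_overwrite_at_pos; infer_instance

-- ===== CLAIM (what is proved, stated in full; the proofs are below) =====
def Claim_equal_overwrite_at_pos : Prop := ∀ (section_ : String) (readme : String), Dom_overwrite_at_pos section_ readme → Pre_overwrite_at_pos section_ readme → Spec_overwrite_at_pos section_ readme (overwrite_at_pos section_ readme)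

-- ===== LEMMAS AND PROOFS =====

def splitNL : List Char → List (List Char)
  | [] => [[]]
  | c :: t => if c = '\n' then [] :: splitNL t else (c :: (splitNL t).headI) :: (splitNL t).tail

lemma splitNL_ne_nil (t : List Char) : splitNL t ≠ [] := by
  cases t <;> simp only [splitNL] <;> (try split) <;> simp

lemma splitOn_go_eq (r : List Char) : ∀ (fuel : Nat) (cur : List Char) (acc : List (List Char)),
    r.length + 1 ≤ fuel →
    PySem.Chars.splitOn.go ['\n'] fuel r cur acc = acc.reverse ++ (splitNL r).modifyHead (cur.reverse ++ ·) := by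
  induction r with
  | nil =>
    intro fuel cur acc h
    match fuel, h with
    | fuel + 1, _ =>
      rw [PySem.Chars.splitOn.go]
      simp [splitNL]
      omega
  | cons c t ih =>
    intro fuel cur acc h
    match fuel, h with
    | fuel + 1, h =>
      rw [PySem.Chars.splitOn.go]
      by_cases hc : c = '\n'
      · subst hc
        have hp : List.isPrefixOf ['\n'] ('\n' :: t) = true := by simp [List.isPrefixOf]
        simp only [hp, if_pos]
        rw [show List.drop (List.length ['\n']) ('\n' :: t) = t by simp]
        rw [ih fuel [] (cur.reverse :: acc) (by simpa using h)]
        simp only [splitNL]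
        cases ht : splitNL t <;> simp
      · have hp : List.isPrefixOf ['\n'] (c :: t) = false := by
          simp [List.isPrefixOf]; exact fun hh => absurd hh.symm hc
        simp only [hp, Bool.false_eq_true, if_false]
        rw [ih fuel (c :: cur) acc (by simpa using h)]
        simp only [splitNL, if_neg hc]
        cases ht : splitNL t with
        | nil => exact absurd ht (splitNL_ne_nil t)
        | cons p ps => simp

lemma splitOn_eq_splitNL (r : List Char) : PySem.Chars.splitOn r ['\n'] = splitNL r := by
  rw [PySem.Chars.splitOn, splitOn_go_eq r (r.length+1) [] [] (by omega)]
  cases h : splitNL r <;> simp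

lemma splitNL_no_nl {r : List Char} (h : '\n' ∉ r) : splitNL r = [r] := by
  induction r with
  | nil => rfl
  | cons c t ih =>
    simp only [List.mem_cons, not_or] at h
    rw [splitNL, if_neg (fun hc => h.1 hc.symm), ih h.2]
    simp

lemma splitNL_append {l : List Char} (rest : List Char) (h : '\n' ∉ l) :
    splitNL (l ++ '\n' :: rest) = l :: splitNL rest := by
  induction l with
  | nil => simp [splitNL]
  | cons c t ih =>
    simp only [List.mem_cons, not_or] at h
    rw [List.cons_append, splitNL, if_neg (fun hc => h.1 hc.symm), ih h.2]
    simp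

lemma count_go_eq (s : List Char) : ∀ (fuel acc : Nat), s.length ≤ fuel →
    PySem.Chars.count.go ['\n'] fuel s acc = acc + s.count '\n' := by
  induction s with
  | nil =>
    intro fuel acc h
    cases fuel <;> rw [PySem.Chars.count.go] <;> simp
  | cons c t ih =>
    intro fuel acc h
    match fuel, h with
    | fuel + 1, h =>
      rw [PySem.Chars.count.go]
      by_cases hc : c = '\n'
      · subst hc
        have hp : List.isPrefixOf ['\n'] ('\n' :: t) = true := by simp [List.isPrefixOf]
        simp only [hp, if_pos]
        rw [show List.drop (List.length ['\n']) ('\n' :: t) = t by simp]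
        rw [ih fuel (acc + 1) (by simpa using h)]
        simp
        omega
      · have hp : List.isPrefixOf ['\n'] (c :: t) = false := by
          simp [List.isPrefixOf]; exact fun hh => absurd hh.symm hc
        simp only [hp, Bool.false_eq_true, if_false]
        rw [ih fuel acc (by simpa using h)]
        simp [hc]

lemma count_nl_eq (s : List Char) : PySem.Chars.count s ['\n'] = s.count '\n' := by
  rw [PySem.Chars.count]
  simpa using count_go_eq s s.length 0 le_rfl

lemma find_eq_of {s sub : List Char} {j : Nat} (h1 : sub <+: s.drop j)
    (h2 : ∀ i < j, ¬ sub <+: s.drop i) : PySem.Chars.find s sub = (j : Int) := by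
  have hinf : sub <:+: s := h1.isInfix.trans (List.drop_suffix j s).isInfix
  have hnn : 0 ≤ PySem.Chars.find s sub := (PySem.Chars.find_nonneg_iff s sub).2 hinf
  obtain ⟨hpre, hmin⟩ := PySem.Chars.find_spec hnn
  have hle : (PySem.Chars.find s sub).toNat ≤ j := by
    by_contra hgt
    exact hmin j (by omega) h1
  have hge : j ≤ (PySem.Chars.find s sub).toNat := by
    by_contra hgt
    exact h2 _ (by omega) hpre
  have ht := Int.toNat_of_nonneg hnn
  omega

lemma no_occ_left {sec l : List Char} (rest : List Char) (hns : '\n' ∉ sec)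
    (hno : ¬ PySem.Chars.isIn sec l = true) :
    ∀ j ≤ l.length, ¬ sec <+: (l ++ '\n' :: rest).drop j := by
  intro j hj hpre
  have hninf : ¬ sec <:+: l := fun h => hno ((PySem.Chars.isIn_iff_infix sec l).2 h)
  have hsn : sec ≠ [] := fun h => hninf (h ▸ List.nil_infix)
  have hslen : 0 < sec.length := List.length_pos_iff.2 hsn
  by_cases hc : j + sec.length ≤ l.length
  · have hdrop : (l ++ '\n' :: rest).drop j = l.drop j ++ '\n' :: rest := by
      rw [List.drop_append_of_le_length hj]
    rw [hdrop] at hpre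
    have heq : sec = (l.drop j ++ '\n' :: rest).take sec.length := List.prefix_iff_eq_take.mp hpre
    have heq2 : sec = (l.drop j).take sec.length := by
      rwa [List.take_append_of_le_length (by simp; omega)] at heq
    have : sec <+: l.drop j := heq2 ▸ List.take_prefix _ _
    exact hninf (this.isInfix.trans (List.drop_suffix j l).isInfix)
  · have hi : l.length - j < sec.length := by omega
    have hgl : '\n' ∈ sec := by
      have h1 : sec[l.length - j]'hi = ((l ++ '\n' :: rest).drop j)[l.length - j]'(by
        simp only [List.length_drop, List.length_append, List.length_cons]
        omega) := hpre.getElem hi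
      have h2 : ((l ++ '\n' :: rest).drop j)[l.length - j]'(by
        simp only [List.length_drop, List.length_append, List.length_cons]
        omega) = (l ++ '\n' :: rest)[j + (l.length - j)]'(by
        simp only [List.length_append, List.length_cons]; omega) := List.getElem_drop
      have h3 : (l ++ '\n' :: rest)[j + (l.length - j)]'(by
        simp only [List.length_append, List.length_cons]; omega) = '\n' := by
        have hj2 : j + (l.length - j) = l.length := by omega
        simp only [hj2]
        rw [List.getElem_append_right (le_refl l.length)]
        simp
      have : sec[l.length - j]'hi = '\n' := by rw [h1, h2, h3]
      exact this ▸ List.getElem_mem hi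
    exact hns hgl

lemma exists_split {r : List Char} (h : '\n' ∈ r) :
    ∃ l rest, r = l ++ '\n' :: rest ∧ '\n' ∉ l := by
  induction r with
  | nil => simp at h
  | cons c t ih =>
    by_cases hc : c = '\n'
    · exact ⟨[], t, by simp [hc], by simp⟩
    · rcases List.mem_cons.mp h with h1 | h2
      · exact absurd h1.symm hc
      · obtain ⟨l, rest, rfl, hnl⟩ := ih h2
        exact ⟨c :: l, rest, rfl, by simp [hnl]; exact fun he => hc he.symm⟩

lemma main_lemma (sec : List Char) (hns : '\n' ∉ sec) :
    ∀ (n : Nat) (r : List Char), r.length ≤ n → PySem.Chars.isIn sec r = true → ∀ idx : Nat,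
    findPosA sec idx (splitNL r) =
      some (idx + (r.take (PySem.Chars.find r sec).toNat).count '\n') := by
  intro n
  induction n with
  | zero =>
    intro r hr hin idx
    have : r = [] := List.eq_nil_of_length_eq_zero (by omega)
    subst this
    rw [splitNL_no_nl (by simp), findPosA, if_pos hin]
    simp
  | succ n ih =>
    intro r hr hin idx
    by_cases hmem : '\n' ∈ r
    · obtain ⟨l, rest, rfl, hnl⟩ := exists_split hmem
      rw [splitNL_append rest hnl, findPosA]
      by_cases hl : PySem.Chars.isIn sec l = true
      · rw [if_pos hl]
        -- sec occurs inside l; find points before the first '\n'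
        obtain ⟨u, v, huv⟩ := (PySem.Chars.isIn_iff_infix sec l).1 hl
        have hpre : sec <+: (l ++ '\n' :: rest).drop u.length := by
          have : (l ++ '\n' :: rest).drop u.length = sec ++ (v ++ '\n' :: rest) := by
            rw [← huv]; simp
          rw [this]; exact List.prefix_append _ _
        have hinf : sec <:+: (l ++ '\n' :: rest) := hpre.isInfix.trans (List.drop_suffix _ _).isInfix
        have hnn : 0 ≤ PySem.Chars.find (l ++ '\n' :: rest) sec :=
          (PySem.Chars.find_nonneg_iff _ _).2 hinf
        obtain ⟨hp2, hmin⟩ := PySem.Chars.find_spec hnn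
        have hfle : (PySem.Chars.find (l ++ '\n' :: rest) sec).toNat ≤ u.length := by
          by_contra hgt
          exact hmin u.length (by omega) hpre
        have hul : u.length ≤ l.length := by
          have := congrArg List.length huv; simp at this; omega
        have hcount : ((l ++ '\n' :: rest).take (PySem.Chars.find (l ++ '\n' :: rest) sec).toNat).count '\n' = 0 := by
          rw [List.take_append_of_le_length (by omega)]
          exact List.count_eq_zero.2 (fun hm => hnl (List.take_subset _ _ hm))
        rw [hcount]
        simp
      · rw [if_neg hl]
        -- sec does not occur in l: every occurrence lies in rest
        have hnol := no_occ_left (sec := sec) (l := l) rest hns hl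
        obtain ⟨j, hj⟩ := (PySem.Chars.exists_prefix_drop_iff_isIn sec (l ++ '\n' :: rest)).2 hin
        have hjgt : l.length < j := by
          by_contra hle
          exact hnol j (by omega) hj
        have hdrop0 : ∀ k : Nat, (l ++ '\n' :: rest).drop (l.length + 1 + k) = rest.drop k := by
          intro k
          rw [show l.length + 1 + k = l.length + (k + 1) by omega,
              List.drop_length_add_append, List.drop_succ_cons]
        have hdropj : (l ++ '\n' :: rest).drop j = rest.drop (j - l.length - 1) := by
          have h := hdrop0 (j - l.length - 1)
          rwa [show l.length + 1 + (j - l.length - 1) = j by omega] at h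
        have hinr : PySem.Chars.isIn sec rest = true := by
          rw [← PySem.Chars.exists_prefix_drop_iff_isIn]
          exact ⟨j - l.length - 1, by rw [← hdropj]; exact hj⟩
        have hgnn : 0 ≤ PySem.Chars.find rest sec := by
          rw [PySem.Chars.find_nonneg_iff, ← PySem.Chars.isIn_iff_infix]; exact hinr
        obtain ⟨hgp, hgmin⟩ := PySem.Chars.find_spec hgnn
        set g : Nat := (PySem.Chars.find rest sec).toNat with hgdef
        have hfind : PySem.Chars.find (l ++ '\n' :: rest) sec = ((l.length + 1 + g : Nat) : Int) := by
          apply find_eq_of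
          · rw [hdrop0 g]; exact hgp
          · intro i hi
            by_cases hil : i ≤ l.length
            · exact hnol i hil
            · have : i = l.length + 1 + (i - l.length - 1) := by omega
              rw [this, hdrop0]
              exact hgmin _ (by omega)
        have hlen : rest.length ≤ n := by simp at hr; omega
        rw [ih rest hlen hinr (idx + 1)]
        have htake : ((l ++ '\n' :: rest).take (PySem.Chars.find (l ++ '\n' :: rest) sec).toNat) = l ++ '\n' :: rest.take g := by
          rw [hfind]
          have h1 : ((l.length + 1 + g : Nat) : Int).toNat = l.length + (1 + g) := by omega
          rw [h1, List.take_length_add_append]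
          rw [show 1 + g = g + 1 by omega, List.take_succ_cons]
        rw [htake]
        have hl0 : l.count '\n' = 0 := List.count_eq_zero.2 hnl
        rw [← hgdef]
        simp only [Option.some.injEq, List.count_append, List.count_cons_self, hl0]
        omega
    · rw [splitNL_no_nl hmem, findPosA, if_pos hin]
      have : (r.take (PySem.Chars.find r sec).toNat).count '\n' = 0 :=
        List.count_eq_zero.2 (fun hm => hmem (List.take_subset _ _ hm))
      rw [this]
      simp

-- ===== VERDICT (by name: the statement is the Claim_ definition above) =====
theorem overwrite_at_pos_spec : Claim_equal_overwrite_at_pos := by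
  intro s r _ hP
  obtain ⟨h1, h2⟩ := hP
  unfold Spec_overwrite_at_pos overwrite_at_pos overwrite_at_pos_alt
  have hne : PySem.Chars.find r.toList s.toList ≠ -1 :=
    (PySem.Chars.find_ne_neg_one_iff r.toList s.toList).2 ((PySem.Chars.isIn_iff_infix s.toList r.toList).1 h2)
  simp only [splitOn_eq_splitNL]
  rw [main_lemma s.toList h1 r.toList.length r.toList le_rfl h2 0]
  rw [if_neg (by simpa using hne)]
  simp [count_nl_eq]
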